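-- pv_equiv track=rewrite | github.com/arshnuri/RefactAI | refactai_app/utils/rule_based_refactor.py | _extract_long_functions
-- ===== SOURCE A (Python) =====
-- def _extract_long_functions(code: str) -> str:
--     """Extract long functions into smaller ones (basic implementation)"""
--     try:
--         lines = code.split('\n')
--         result_lines = []
--         in_function = False
--         function_lines = 0
--         indent_level = 0
--
--         for line in lines:
--             if line.strip().startswith('def '):
--                 in_function = True
--                 function_lines = 0
--                 indent_level = len(line) - len(line.lstrip())
--                 result_lines.append(line)
--             elif in_function:
--                 function_lines += 1
--                 current_indent = len(line) - len(line.lstrip())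
--
--                 # Check if we're still in the function
--                 if line.strip() and current_indent <= indent_level:
--                     in_function = False
--                     # Add suggestion comment if function was long
--                     if function_lines > 20:
--                         comment_indent = ' ' * (indent_level + 4)
--                         result_lines.insert(-function_lines, f"{comment_indent}# TODO: Consider breaking this function into smaller functions")
--
--                 result_lines.append(line)
--             else:
--                 result_lines.append(line)
--
--         return '\n'.join(result_lines)
--
--     except Exception:
--         return code
-- ===== SOURCE B (Python) =====
-- def _extract_long_functions(code: str) -> str:
--     lines = code.split('\n')
--     # Pass 1: collect (def_line_index, indent) for each long function, in order.
--     flags = []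
--     cur = None          # (index, indent) of the currently open def, if any
--     count = 0
--     for i, line in enumerate(lines):
--         stripped = line.strip()
--         if stripped.startswith('def '):
--             cur = (i, len(line) - len(line.lstrip()))
--             count = 0
--         elif cur is not None:
--             count += 1
--             if stripped and len(line) - len(line.lstrip()) <= cur[1]:
--                 if count > 20:
--                     flags.append(cur)
--                 cur = None
--     # Pass 2: merge the ordered flag queue with the lines.
--     out = []
--     k = 0
--     for i, line in enumerate(lines):
--         if k < len(flags) and flags[k][0] == i:
--             out.append(' ' * (flags[k][1] + 4) + "# TODO: Consider breaking this function into smaller functions")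
--             k += 1
--         out.append(line)
--     return '\n'.join(out)
-- ===== Notes on version B (the rewrite author's own statement) =====
-- stated objective: alternative
-- what changed: A single pass that edits the growing result list in place with a negative-index insert is replaced by two passes: pass 1 only records the (index, indent) queue of flagged long-function def lines, pass 2 merges that ordered queue with the original lines, so no list is ever edited in the middle.
import Mathlib
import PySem

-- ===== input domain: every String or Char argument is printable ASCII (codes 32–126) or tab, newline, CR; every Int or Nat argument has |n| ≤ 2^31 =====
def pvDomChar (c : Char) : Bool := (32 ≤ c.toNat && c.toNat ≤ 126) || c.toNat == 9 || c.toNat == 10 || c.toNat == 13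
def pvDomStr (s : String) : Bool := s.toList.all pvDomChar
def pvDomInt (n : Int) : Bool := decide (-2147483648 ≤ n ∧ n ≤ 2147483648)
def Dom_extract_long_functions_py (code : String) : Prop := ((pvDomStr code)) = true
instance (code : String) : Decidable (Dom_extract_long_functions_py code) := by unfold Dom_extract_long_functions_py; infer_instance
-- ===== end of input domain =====

-- B replaces A's single pass that edits the result list via a negative-index insert with
-- two passes: pass 1 only records (def-line index, indent) of each flagged long function,
-- pass 2 merges that ordered flag queue with the lines (objective: alternative, same cost).

-- ===== PORT A =====
-- shared per-line primitives (each is the exact Python subexpression both sources use)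
def pvIsDef (line : List Char) : Bool := PySem.Chars.startswith (PySem.Chars.strip line) "def ".toList
def pvIndent (line : List Char) : Nat := line.length - (PySem.Chars.lstrip line).length
def pvTodo (ind : Nat) : List Char :=
  List.replicate (ind + 4) ' ' ++ "# TODO: Consider breaking this function into smaller functions".toList

-- loop body of A: state = (result_lines, in_function, function_lines, indent_level)
def pvStepA : (List (List Char) × Bool × Nat × Nat) → (List Char) → (List (List Char) × Bool × Nat × Nat)
  | (res, inF, fl, ind), line =>
    if pvIsDef line then
      (res ++ [line], true, 0, pvIndent line)
    else if inF then
      let fl' := fl + 1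
      if PySem.Chars.strip line ≠ [] ∧ pvIndent line ≤ ind then
        ((if fl' > 20 then PySem.List.insert res (-((fl' : Nat) : Int)) (pvTodo ind) else res) ++ [line],
          false, fl', ind)
      else
        (res ++ [line], true, fl', ind)
    else
      (res ++ [line], false, fl, ind)

def extract_long_functions_py (code : String) : String :=
  String.ofList (PySem.Chars.join ['\n']
    (((PySem.Chars.splitOn code.toList ['\n']).foldl pvStepA ([], false, 0, 0)).1))

-- ===== PORT B =====
-- pass-1 loop body: state = (flags, cur, count)
def pvStep1 : (List (Int × Nat) × Option (Int × Nat) × Nat) → (Int × List Char) → (List (Int × Nat) × Option (Int × Nat) × Nat)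
  | (flags, cur, count), p =>
    if pvIsDef p.2 then
      (flags, some (p.1, pvIndent p.2), 0)
    else
      match cur with
      | some c =>
        let count' := count + 1
        if PySem.Chars.strip p.2 ≠ [] ∧ pvIndent p.2 ≤ c.2 then
          ((if count' > 20 then flags ++ [c] else flags), none, count')
        else
          (flags, some c, count')
      | none => (flags, none, count)

-- pass-2 loop body: state = (out, k)
def pvStep2 (flags : List (Int × Nat)) : (List (List Char) × Nat) → (Int × List Char) → (List (List Char) × Nat)
  | (out, k), p =>
    match flags[k]? with
    | some f => if f.1 = p.1 then (out ++ [pvTodo f.2, p.2], k + 1) else (out ++ [p.2], k)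
    | none => (out ++ [p.2], k)

def extract_long_functions_py_alt (code : String) : String :=
  let lines := PySem.Chars.splitOn code.toList ['\n']
  let flags := ((PySem.List.enumerate lines 0).foldl pvStep1 ([], none, 0)).1
  String.ofList (PySem.Chars.join ['\n'] (((PySem.List.enumerate lines 0).foldl (pvStep2 flags) ([], 0)).1))

-- ===== PRECONDITION & SPEC =====
def Spec_extract_long_functions_py (code : String) (out : String) : Prop := out = extract_long_functions_py_alt code
instance (code : String) (out : String) : Decidable (Spec_extract_long_functions_py code out) := by unfold Spec_extract_long_functions_py; infer_instance

-- ===== CLAIM (what is proved, stated in full; the proofs are below) =====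
def Claim_equal_extract_long_functions_py : Prop := ∀ (code : String), Dom_extract_long_functions_py code → Spec_extract_long_functions_py code (extract_long_functions_py code)

-- ===== LEMMAS AND PROOFS =====

-- final flag list of pass 1 started at line index i in state (acc, cur, count)
def pvP1 (ls : List (List Char)) (i : Int) (st : List (Int × Nat) × Option (Int × Nat) × Nat) : List (Int × Nat) :=
  ((PySem.List.enumerate ls i).foldl pvStep1 st).1

-- merge of an ordered flag queue with the enumerated lines (the meaning of pass 2)
def pvMerge : List (Int × Nat) → List (Int × List Char) → List (List Char)
  | _, [] => []
  | [], (_, l) :: ps => l :: pvMerge [] ps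
  | (s, ind) :: fs', (i, l) :: ps =>
    if s = i then pvTodo ind :: l :: pvMerge fs' ps else l :: pvMerge ((s, ind) :: fs') ps

-- what A produces from an in-function state whose pending function lines are `pend`
def pvWrap (s : Int) (pend : List (List Char)) (fs : List (Int × Nat)) (ps : List (Int × List Char)) : List (List Char) :=
  match fs with
  | (s', ind') :: fs' => if s' = s then pvTodo ind' :: (pend ++ pvMerge fs' ps) else pend ++ pvMerge fs ps
  | [] => pend ++ pvMerge [] ps

-- flag indices produced from an in-function state: the open def's index s first (maybe), then only ≥ i
def pvShaped (s : Int) (i : Int) (fs : List (Int × Nat)) : Prop :=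
  (∀ f ∈ fs, i ≤ f.1) ∨ ∃ ind tl, fs = (s, ind) :: tl ∧ ∀ f ∈ tl, i ≤ f.1

theorem pvInsert_neg (xs ys : List (List Char)) (v : List Char) (h : 0 < ys.length) :
    PySem.List.insert (xs ++ ys) (-((ys.length : Nat) : Int)) v = xs ++ v :: ys := by
  simp [PySem.List.insert, PySem.List.sliceIndices, h]

theorem pvP1_cons (l : List Char) (ls : List (List Char)) (i : Int) (st : List (Int × Nat) × Option (Int × Nat) × Nat) :
    pvP1 (l :: ls) i st = pvP1 ls (i + 1) (pvStep1 st (i, l)) := by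
  simp [pvP1, PySem.List.enumerate_cons]

theorem pvStep1_acc (acc : List (Int × Nat)) (cur : Option (Int × Nat)) (c : Nat) (p : Int × List Char) :
    pvStep1 (acc, cur, c) p =
      (acc ++ (pvStep1 ([], cur, c) p).1, (pvStep1 ([], cur, c) p).2.1, (pvStep1 ([], cur, c) p).2.2) := by
  cases cur <;> simp only [pvStep1] <;> split_ifs <;> simp

theorem pvP1_acc (ls : List (List Char)) : ∀ (i : Int) (acc : List (Int × Nat)) (cur : Option (Int × Nat)) (c : Nat),
    pvP1 ls i (acc, cur, c) = acc ++ pvP1 ls i ([], cur, c) := by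
  induction ls with
  | nil => intro i acc cur c; simp [pvP1, PySem.List.enumerate]
  | cons l ls ih =>
    intro i acc cur c
    rcases h : pvStep1 ([], cur, c) (i, l) with ⟨X1, X2, X3⟩
    rw [pvP1_cons, pvP1_cons, pvStep1_acc, h]
    rw [ih (i + 1) (acc ++ X1) X2 X3, ih (i + 1) X1 X2 X3, List.append_assoc]

theorem pvLB (ls : List (List Char)) : ∀ (i : Int),
    (∀ (c : Nat), ∀ f ∈ pvP1 ls i ([], none, c), i ≤ f.1) ∧
    (∀ (s : Int) (ind c : Nat), s < i → pvShaped s i (pvP1 ls i ([], some (s, ind), c))) := by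
  induction ls with
  | nil =>
    intro i
    constructor
    · intro c f hf; simp [pvP1, PySem.List.enumerate] at hf
    · intro s ind c _; left; intro f hf; simp [pvP1, PySem.List.enumerate] at hf
  | cons l ls ih =>
    intro i
    obtain ⟨ihn, ihs⟩ := ih (i + 1)
    have hnewdef : ∀ f ∈ pvP1 ls (i + 1) ([], some (i, pvIndent l), 0), i ≤ f.1 := by
      intro f hf
      rcases ihs i (pvIndent l) 0 (by omega) with hall | ⟨ind', tl, heq, htl⟩
      · have := hall f hf; omega
      · rw [heq] at hf
        rcases List.mem_cons.1 hf with h1 | h2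
        · subst h1; simp
        · have := htl f h2; omega
    constructor
    · intro c f hf
      rw [pvP1_cons] at hf
      by_cases hdf : pvIsDef l
      · rw [show pvStep1 ([], none, c) (i, l) = ([], some (i, pvIndent l), 0) by
            simp [pvStep1, hdf]] at hf
        exact hnewdef f hf
      · rw [show pvStep1 ([], none, c) (i, l) = ([], none, c) by simp [pvStep1, hdf]] at hf
        have := ihn c f hf; omega
    · intro s ind c hsi
      rw [pvP1_cons]
      by_cases hdf : pvIsDef l
      · rw [show pvStep1 ([], some (s, ind), c) (i, l) = ([], some (i, pvIndent l), 0) by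
            simp [pvStep1, hdf]]
        exact Or.inl (hnewdef)
      · by_cases hcl : PySem.Chars.strip l ≠ [] ∧ pvIndent l ≤ ind
        · by_cases hbig : c + 1 > 20
          · rw [show pvStep1 ([], some (s, ind), c) (i, l) = ([(s, ind)], none, c + 1) by
                simp [pvStep1, hdf, hcl, hbig]]
            rw [show pvP1 ls (i + 1) ([(s, ind)], none, c + 1)
                  = (s, ind) :: pvP1 ls (i + 1) ([], none, c + 1) from pvP1_acc ls (i + 1) [(s, ind)] none (c + 1)]
            exact Or.inr ⟨ind, _, rfl, fun f hf => by have := ihn (c + 1) f hf; omega⟩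
          · rw [show pvStep1 ([], some (s, ind), c) (i, l) = ([], none, c + 1) by
                simp [pvStep1, hdf, hcl, hbig]]
            exact Or.inl (fun f hf => by have := ihn (c + 1) f hf; omega)
        · rw [show pvStep1 ([], some (s, ind), c) (i, l) = ([], some (s, ind), c + 1) by
              simp [pvStep1, hdf, hcl]]
          rcases ihs s ind (c + 1) (by omega) with hall | ⟨ind', tl, heq, htl⟩
          · exact Or.inl (fun f hf => by have := hall f hf; omega)
          · exact Or.inr ⟨ind', tl, heq, fun f hf => by have := htl f hf; omega⟩

theorem pvMerge_skip (fs : List (Int × Nat)) (i : Int) (l : List Char) (ps : List (Int × List Char))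
    (h : ∀ f ∈ fs, i + 1 ≤ f.1) : pvMerge fs ((i, l) :: ps) = l :: pvMerge fs ps := by
  cases fs with
  | nil => simp [pvMerge]
  | cons f tl =>
    obtain ⟨s, ind⟩ := f
    have hs := h (s, ind) (List.mem_cons_self ..)
    simp only [pvMerge]
    rw [if_neg (by simp at hs ⊢; omega)]

theorem pvWrap_not_head (s : Int) (pend : List (List Char)) (fs : List (Int × Nat)) (ps : List (Int × List Char))
    (h : ∀ f ∈ fs, ¬ f.1 = s) : pvWrap s pend fs ps = pend ++ pvMerge fs ps := by
  cases fs with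
  | nil => rfl
  | cons f tl =>
    obtain ⟨s2, ind2⟩ := f
    simp only [pvWrap]
    rw [if_neg (h (s2, ind2) (List.mem_cons_self ..))]

theorem pvMain (ls : List (List Char)) : ∀ (i : Int),
    (∀ (done : List (List Char)) (fl0 ind0 c0 : Nat),
      (ls.foldl pvStepA (done, false, fl0, ind0)).1 =
        done ++ pvMerge (pvP1 ls i ([], none, c0)) (PySem.List.enumerate ls i)) ∧
    (∀ (done : List (List Char)) (s : Int) (ind fl : Nat) (pend : List (List Char)),
      pend.length = fl + 1 → s < i →
      (ls.foldl pvStepA (done ++ pend, true, fl, ind)).1 =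
        done ++ pvWrap s pend (pvP1 ls i ([], some (s, ind), fl)) (PySem.List.enumerate ls i)) := by
  induction ls with
  | nil =>
    intro i
    constructor
    · intro done fl0 ind0 c0
      simp [pvP1, PySem.List.enumerate, pvMerge]
    · intro done s ind fl pend hlen hsi
      simp [pvP1, PySem.List.enumerate, pvWrap, pvMerge]
  | cons l ls ih =>
    intro i
    obtain ⟨ihA, ihB⟩ := ih (i + 1)
    obtain ⟨lbn, lbs⟩ := pvLB ls (i + 1)
    have hnewdef : ∀ f ∈ pvP1 ls (i + 1) ([], some (i, pvIndent l), 0), i ≤ f.1 := by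
      intro f hf
      rcases lbs i (pvIndent l) 0 (by omega) with hall | ⟨ind', tl, heq, htl⟩
      · have := hall f hf; omega
      · rw [heq] at hf
        rcases List.mem_cons.1 hf with h1 | h2
        · subst h1; simp
        · have := htl f h2; omega
    constructor
    · intro done fl0 ind0 c0
      rw [PySem.List.enumerate_cons]
      simp only [List.foldl_cons]
      by_cases hdf : pvIsDef l
      · rw [show pvStepA (done, false, fl0, ind0) l = (done ++ [l], true, 0, pvIndent l) by
            simp [pvStepA, hdf]]
        rw [pvP1_cons, show pvStep1 ([], none, c0) (i, l) = ([], some (i, pvIndent l), 0) by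
            simp [pvStep1, hdf]]
        rw [ihB done i (pvIndent l) 0 [l] (by simp) (by omega)]
        congr 1
        rcases hfs : pvP1 ls (i + 1) ([], some (i, pvIndent l), 0) with _ | ⟨⟨s', ind'⟩, tl⟩
        · simp [pvWrap, pvMerge]
        · by_cases hsi' : s' = i
          · subst hsi'; simp [pvWrap, pvMerge]
          · simp [pvWrap, pvMerge, hsi']
      · rw [show pvStepA (done, false, fl0, ind0) l = (done ++ [l], false, fl0, ind0) by
            simp [pvStepA, hdf]]
        rw [pvP1_cons, show pvStep1 ([], none, c0) (i, l) = ([], none, c0) by simp [pvStep1, hdf]]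
        rw [ihA (done ++ [l]) fl0 ind0 c0]
        rw [pvMerge_skip _ i l _ (lbn c0)]
        simp
    · intro done s ind fl pend hlen hsi
      rw [PySem.List.enumerate_cons]
      simp only [List.foldl_cons]
      by_cases hdf : pvIsDef l
      · rw [show pvStepA (done ++ pend, true, fl, ind) l = ((done ++ pend) ++ [l], true, 0, pvIndent l) by
            simp [pvStepA, hdf]]
        rw [pvP1_cons, show pvStep1 ([], some (s, ind), fl) (i, l) = ([], some (i, pvIndent l), 0) by
            simp [pvStep1, hdf]]
        rw [ihB (done ++ pend) i (pvIndent l) 0 [l] (by simp) (by omega)]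
        rcases hfs : pvP1 ls (i + 1) ([], some (i, pvIndent l), 0) with _ | ⟨⟨s2, ind2⟩, tl⟩
        · simp [pvWrap, pvMerge]
        · have hs2 : i ≤ s2 := by
            have := hnewdef (s2, ind2) (by rw [hfs]; exact List.mem_cons_self ..); simpa using this
          have h2 : ¬ s2 = s := by omega
          by_cases h3 : s2 = i
          · subst h3; simp [pvWrap, pvMerge, h2]
          · simp [pvWrap, pvMerge, h2, h3]
      · by_cases hcl : PySem.Chars.strip l ≠ [] ∧ pvIndent l ≤ ind
        · by_cases hbig : fl + 1 > 20
          · rw [show pvStepA (done ++ pend, true, fl, ind) l =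
                (PySem.List.insert (done ++ pend) (-(((fl + 1 : Nat)) : Int)) (pvTodo ind) ++ [l],
                  false, fl + 1, ind) by simp [pvStepA, hdf, hcl, hbig]]
            rw [show PySem.List.insert (done ++ pend) (-(((fl + 1 : Nat)) : Int)) (pvTodo ind)
                  = done ++ pvTodo ind :: pend by
                rw [← hlen]; exact pvInsert_neg done pend _ (by rw [hlen]; omega)]
            rw [pvP1_cons, show pvStep1 ([], some (s, ind), fl) (i, l) = ([(s, ind)], none, fl + 1) by
                simp [pvStep1, hdf, hcl, hbig]]
            rw [pvP1_acc]
            rw [ihA ((done ++ pvTodo ind :: pend) ++ [l]) (fl + 1) ind (fl + 1)]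
            rw [show ([(s, ind)] ++ pvP1 ls (i + 1) ([], none, fl + 1))
                  = (s, ind) :: pvP1 ls (i + 1) ([], none, fl + 1) from rfl]
            simp only [pvWrap, if_true]
            rw [pvMerge_skip _ i l _ (lbn (fl + 1))]
            simp
          · rw [show pvStepA (done ++ pend, true, fl, ind) l = ((done ++ pend) ++ [l], false, fl + 1, ind) by
                simp [pvStepA, hdf, hcl, hbig]]
            rw [pvP1_cons, show pvStep1 ([], some (s, ind), fl) (i, l) = ([], none, fl + 1) by
                simp [pvStep1, hdf, hcl, hbig]]
            rw [ihA ((done ++ pend) ++ [l]) (fl + 1) ind (fl + 1)]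
            rw [pvWrap_not_head s pend _ _ (fun f hf => by have := lbn (fl + 1) f hf; omega)]
            rw [pvMerge_skip _ i l _ (lbn (fl + 1))]
            simp
        · rw [show pvStepA (done ++ pend, true, fl, ind) l = ((done ++ pend) ++ [l], true, fl + 1, ind) by
              simp [pvStepA, hdf, hcl]]
          rw [pvP1_cons, show pvStep1 ([], some (s, ind), fl) (i, l) = ([], some (s, ind), fl + 1) by
              simp [pvStep1, hdf, hcl]]
          rw [List.append_assoc]
          rw [ihB done s ind (fl + 1) (pend ++ [l]) (by simp [hlen]) (by omega)]
          congr 1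
          rcases lbs s ind (fl + 1) (by omega) with hall | ⟨ind', tl, heq, htl⟩
          · rw [pvWrap_not_head s (pend ++ [l]) _ _ (fun f hf => by have := hall f hf; omega)]
            rw [pvWrap_not_head s pend _ _ (fun f hf => by have := hall f hf; omega)]
            rw [pvMerge_skip _ i l _ hall]
            simp
          · rw [heq]
            simp only [pvWrap]
            simp only [if_true]
            rw [pvMerge_skip _ i l _ htl]
            simp

theorem pvPass2 (flags : List (Int × Nat)) : ∀ (ps : List (Int × List Char)) (out : List (List Char)) (k : Nat),
    ((ps.foldl (pvStep2 flags) (out, k)).1) = out ++ pvMerge (flags.drop k) ps := by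
  intro ps
  induction ps with
  | nil => intro out k; simp [pvMerge]
  | cons p ps ih =>
    intro out k
    obtain ⟨i, l⟩ := p
    rcases hd : flags.drop k with _ | ⟨⟨s, ind⟩, tl⟩
    · have hk : flags[k]? = none := by rw [← List.head?_drop, hd]; rfl
      simp only [List.foldl_cons, pvStep2, hk]
      rw [ih, hd]
      simp [pvMerge]
    · have hk : flags[k]? = some (s, ind) := by rw [← List.head?_drop, hd]; rfl
      have hd1 : flags.drop (k + 1) = tl := by rw [← List.tail_drop, hd]; rfl
      by_cases hsi : s = i
      · subst hsi
        simp only [List.foldl_cons, pvStep2, hk]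
        simp only [if_true]
        rw [ih, hd1, pvMerge, if_pos rfl]
        simp
      · simp only [List.foldl_cons, pvStep2, hk]
        rw [if_neg hsi, ih, hd, pvMerge, if_neg hsi]
        simp

-- ===== VERDICT (by name: the statement is the Claim_ definition above) =====
theorem extract_long_functions_py_spec : Claim_equal_extract_long_functions_py := by
  intro code _
  unfold Spec_extract_long_functions_py extract_long_functions_py extract_long_functions_py_alt
  have hA := (pvMain (PySem.Chars.splitOn code.toList ['\n']) 0).1 [] 0 0 0
  have hB := pvPass2 (pvP1 (PySem.Chars.splitOn code.toList ['\n']) 0 ([], none, 0))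
      (PySem.List.enumerate (PySem.Chars.splitOn code.toList ['\n']) 0) [] 0
  simp only [List.nil_append, List.drop_zero] at hA hB
  rw [hA]
  exact congrArg (fun l => String.ofList (PySem.Chars.join ['\n'] l)) hB.symm
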